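-- pv_equiv track=rewrite | github.com/AlishaTiller/EBEC-HW-Week-12 | solo_wof_abtiller.py | removed_guess
-- ===== SOURCE A (Python) =====
-- def removed_guess(phrase,guessed):
--
--     result = ''
--     for letter in phrase:
--         if letter in guessed:
--             result = result + ' '
--         else:
--             result = result + letter
--
--     return result
-- ===== SOURCE B (Python) =====
-- def removed_guess(phrase, guessed):
--     table = {ord(c): ' ' for c in guessed if len(c) == 1}
--     return phrase.translate(table)
-- ===== Notes on version B (the rewrite author's own statement) =====
-- stated objective: faster
-- what changed: Builds a translation table once from the single-character guesses and does one table-driven phrase.translate pass, instead of a per-character loop with a membership scan over guessed and quadratic string concatenation.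
import Mathlib
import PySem

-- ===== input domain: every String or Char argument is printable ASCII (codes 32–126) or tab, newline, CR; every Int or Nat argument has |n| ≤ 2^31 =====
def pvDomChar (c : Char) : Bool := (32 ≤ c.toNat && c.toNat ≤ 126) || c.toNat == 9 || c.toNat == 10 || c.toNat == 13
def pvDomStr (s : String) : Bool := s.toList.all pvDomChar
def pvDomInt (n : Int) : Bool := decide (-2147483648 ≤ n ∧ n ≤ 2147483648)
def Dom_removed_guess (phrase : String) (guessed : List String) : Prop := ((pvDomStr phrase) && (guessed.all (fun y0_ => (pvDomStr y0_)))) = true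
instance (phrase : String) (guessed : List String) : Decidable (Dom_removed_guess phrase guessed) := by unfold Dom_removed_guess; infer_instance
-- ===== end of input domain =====

-- B replaces the per-character loop with string concatenation by a precomputed
-- translation table and a single table-driven pass (idiomatic; same return value).
-- ===== PORT A =====
-- literal port of A: fold over the phrase's characters, appending ' ' or the character
def removed_guess (phrase : String) (guessed : List String) : String :=
  String.ofList (phrase.toList.foldl
    (fun result letter =>
      if guessed.contains (String.ofList [letter]) then result ++ [' '] else result ++ [letter]) [])

-- ===== PORT B =====
-- B: build the translation table (char domain) once, then one map over the phrase
def rgTable (guessed : List String) : List Char :=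
  guessed.filterMap (fun s => match s.toList with | [c] => some c | _ => none)

def removed_guess_alt (phrase : String) (guessed : List String) : String :=
  let table := rgTable guessed
  String.ofList (phrase.toList.map (fun c => if table.contains c then ' ' else c))

-- ===== PRECONDITION & SPEC =====
def Spec_removed_guess (phrase : String) (guessed : List String) (out : String) : Prop := out = removed_guess_alt phrase guessed
instance (phrase : String) (guessed : List String) (out : String) : Decidable (Spec_removed_guess phrase guessed out) := by unfold Spec_removed_guess; infer_instance

-- ===== CLAIM (what is proved, stated in full; the proofs are below) =====
def Claim_equal_removed_guess : Prop := ∀ (phrase : String) (guessed : List String), Dom_removed_guess phrase guessed → Spec_removed_guess phrase guessed (removed_guess phrase guessed)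

-- ===== LEMMAS AND PROOFS =====

theorem rg_match_eq (s : String) (c : Char) :
    ((match s.toList with | [c'] => some c' | _ => none) = some c) ↔ s = String.ofList [c] := by
  constructor
  · intro h
    match hl : s.toList with
    | [] => rw [hl] at h; simp at h
    | [c'] =>
        rw [hl] at h; simp at h
        rw [← h, ← hl]; simp
    | c' :: c'' :: rest => rw [hl] at h; simp at h
  · intro h; subst h; simp

theorem rg_mem_iff (c : Char) (guessed : List String) :
    (String.ofList [c]) ∈ guessed ↔ c ∈ rgTable guessed := by
  simp only [rgTable, List.mem_filterMap]
  constructor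
  · intro h
    exact ⟨String.ofList [c], h, by simp⟩
  · rintro ⟨s, hs, hm⟩
    rw [rg_match_eq] at hm
    exact hm ▸ hs

theorem rg_contains_eq (c : Char) (guessed : List String) :
    guessed.contains (String.ofList [c]) = (rgTable guessed).contains c := by
  simp [rg_mem_iff]

theorem rg_foldl_eq (P : Char → Bool) (l acc : List Char) :
    l.foldl (fun res c => if P c then res ++ [' '] else res ++ [c]) acc
      = acc ++ l.map (fun c => if P c then ' ' else c) := by
  induction l generalizing acc with
  | nil => simp
  | cons c tl ih =>
    by_cases h : P c = true <;> simp [List.foldl_cons, h, ih]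

-- ===== VERDICT (by name: the statement is the Claim_ definition above) =====
theorem removed_guess_spec : Claim_equal_removed_guess := by
  intro phrase guessed _
  unfold Spec_removed_guess removed_guess removed_guess_alt
  simp only [rg_contains_eq]
  rw [rg_foldl_eq (fun c => (rgTable guessed).contains c) phrase.toList []]
  simp
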